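-- pv_equiv track=rewrite | github.com/ihwang/taskmaster | src/programs.py | deci_to_octal
-- ===== SOURCE A (Python) =====
-- def deci_to_octal(nb):
--     ret = nb % 10
--     nb = nb // 10
--     i = 8
--     while nb:
--         target = nb % 10
--         nb = nb // 10
--         target *= i
--         ret += target
--         i *= 8
--     return ret
-- ===== SOURCE B (Python) =====
-- def deci_to_octal(nb):
--     digits = []
--     while True:
--         digits.append(nb % 10)
--         nb //= 10
--         if not nb:
--             break
--     val = 0
--     for d in reversed(digits):
--         val = val * 8 + d
--     return val
-- ===== Notes on version B (the rewrite author's own statement) =====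
-- stated objective: alternative
-- what changed: Replaces A's single loop with a running power-of-8 multiplier by two staged passes: first collect the decimal digits into a list, then fold the reversed list MSB-first in Horner style (val = val*8 + d), with no power variable at all.
import Mathlib
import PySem

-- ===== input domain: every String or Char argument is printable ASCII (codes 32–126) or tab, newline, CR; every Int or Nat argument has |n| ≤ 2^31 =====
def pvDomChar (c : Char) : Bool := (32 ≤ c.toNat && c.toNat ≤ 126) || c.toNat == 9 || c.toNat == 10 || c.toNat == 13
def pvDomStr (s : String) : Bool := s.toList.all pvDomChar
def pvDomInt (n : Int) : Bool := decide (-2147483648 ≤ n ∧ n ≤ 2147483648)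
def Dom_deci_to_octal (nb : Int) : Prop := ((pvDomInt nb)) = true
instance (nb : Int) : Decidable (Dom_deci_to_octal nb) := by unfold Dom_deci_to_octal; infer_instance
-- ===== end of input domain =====

-- B replaces A's one-pass loop (running power-of-8 multiplier) by two staged passes:
-- collect the decimal digits into a list, then Horner-fold the reversed list; equivalence proved for nb ≥ 0.

-- ===== PORT A =====
-- A's while loop: 'while nb:' with nb := nb // 10 each pass. For nb < 0 the Python
-- loop never terminates; that region is outside Pre_, the port returns ret there.
def deciLoopA (nb ret i : Int) : Int :=
  if h : nb ≤ 0 then ret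
  else deciLoopA (PySem.Int.floordiv nb 10) (ret + PySem.Int.mod nb 10 * i) (i * 8)
termination_by nb.toNat
decreasing_by
  have h10 : PySem.Int.floordiv nb 10 = nb / 10 :=
    PySem.Int.floordiv_eq_ediv_of_pos (by omega)
  simp only [h10]; omega

def deci_to_octal (nb : Int) : Int :=
  deciLoopA (PySem.Int.floordiv nb 10) (PySem.Int.mod nb 10) 8

-- ===== PORT B =====
-- First pass of Source B: the do-while collecting nb % 10 into a list, exiting when nb // 10
-- becomes falsy. Python exits on nb' == 0; for nb' < 0 (negative nb) the Python loop never
-- terminates — that region is outside Pre_, the port stops there too (totality guard only).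
def collectDigits (nb : Int) : List Int :=
  if _h : PySem.Int.floordiv nb 10 ≤ 0 then [PySem.Int.mod nb 10]
  else PySem.Int.mod nb 10 :: collectDigits (PySem.Int.floordiv nb 10)
termination_by nb.toNat
decreasing_by
  simp only [PySem.Int.floordiv_eq_ediv_of_pos (show (0:Int) < 10 by omega)] at _h ⊢
  omega

-- Second pass of Source B: the for-loop over reversed(digits), val = val * 8 + d.
def deci_to_octal_alt (nb : Int) : Int :=
  (collectDigits nb).reverse.foldl (fun val d => val * 8 + d) 0

-- ===== PRECONDITION & SPEC =====
-- Pre_ excludes negative nb: there A's while loop never terminates (and B's first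
-- pass never terminates either), so A returns no value on those inputs.
def Pre_deci_to_octal (nb : Int) : Prop := 0 ≤ nb
instance (nb : Int) : Decidable (Pre_deci_to_octal nb) := by unfold Pre_deci_to_octal; infer_instance
def pvWitness_deci_to_octal : Int := (19)

def Spec_deci_to_octal (nb : Int) (out : Int) : Prop := out = deci_to_octal_alt nb
instance (nb : Int) (out : Int) : Decidable (Spec_deci_to_octal nb out) := by unfold Spec_deci_to_octal; infer_instance

-- ===== CLAIM (what is proved, stated in full; the proofs are below) =====
def Claim_equal_deci_to_octal : Prop := ∀ (nb : Int), Dom_deci_to_octal nb → Pre_deci_to_octal nb → Spec_deci_to_octal nb (deci_to_octal nb)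

-- ===== LEMMAS AND PROOFS =====

-- proof-only closed recursion: the Horner value both ports compute
def hornerOct (nb : Int) : Int :=
  if h : nb ≤ 0 then 0
  else hornerOct (nb / 10) * 8 + nb % 10
termination_by nb.toNat
decreasing_by omega

-- loop invariant for A: the loop computes ret + i * hornerOct nb
theorem deciLoopA_eq (n : Nat) (nb ret i : Int) (hn : nb.toNat = n) :
    deciLoopA nb ret i = ret + i * hornerOct nb := by
  induction n using Nat.strong_induction_on generalizing nb ret i with
  | _ n ih =>
    rw [deciLoopA, hornerOct]
    by_cases h : nb ≤ 0
    · simp [h]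
    · simp only [h, dif_neg, not_false_iff]
      have h10 : PySem.Int.floordiv nb 10 = nb / 10 :=
        PySem.Int.floordiv_eq_ediv_of_pos (by omega)
      have hm : PySem.Int.mod nb 10 = nb % 10 :=
        PySem.Int.mod_eq_emod_of_pos (by omega)
      have hlt : (PySem.Int.floordiv nb 10).toNat < n := by rw [h10]; omega
      rw [ih _ hlt _ _ _ rfl, h10, hm]
      ring

-- B's two passes also compute hornerOct (for nb ≥ 0)
theorem collectDigits_horner (n : Nat) (nb : Int) (hn : nb.toNat = n) (hnb : 0 ≤ nb) :
    (collectDigits nb).foldr (fun d val => val * 8 + d) 0 = hornerOct nb := by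
  induction n using Nat.strong_induction_on generalizing nb with
  | _ n ih =>
    rw [collectDigits]
    have h10 : PySem.Int.floordiv nb 10 = nb / 10 :=
      PySem.Int.floordiv_eq_ediv_of_pos (by omega)
    have hm : PySem.Int.mod nb 10 = nb % 10 :=
      PySem.Int.mod_eq_emod_of_pos (by omega)
    simp only [h10, hm]
    by_cases h : nb / 10 ≤ 0
    · simp only [h, dif_pos, List.foldr]
      rw [hornerOct]
      by_cases h0 : nb ≤ 0
      · have : nb = 0 := le_antisymm h0 hnb
        subst this; simp
      · simp only [h0, dif_neg, not_false_iff]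
        rw [hornerOct]
        have : nb / 10 = 0 := by omega
        simp [this]
    · simp only [h, dif_neg, not_false_iff, List.foldr]
      have hlt : (nb / 10).toNat < n := by omega
      rw [ih _ hlt _ rfl (by omega)]
      conv_rhs => rw [hornerOct]
      have hpos : ¬ nb ≤ 0 := by omega
      simp [hpos]

-- ===== VERDICT (by name: the statement is the Claim_ definition above) =====
theorem deci_to_octal_spec : Claim_equal_deci_to_octal := by
  intro nb _ hpre
  unfold Spec_deci_to_octal deci_to_octal deci_to_octal_alt
  rw [List.foldl_reverse, collectDigits_horner _ _ rfl hpre,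
      deciLoopA_eq _ _ _ _ rfl]
  conv_rhs => rw [hornerOct]
  have h10 : PySem.Int.floordiv nb 10 = nb / 10 :=
    PySem.Int.floordiv_eq_ediv_of_pos (by omega)
  have hm : PySem.Int.mod nb 10 = nb % 10 :=
    PySem.Int.mod_eq_emod_of_pos (by omega)
  by_cases h : nb ≤ 0
  · have : nb = 0 := le_antisymm h hpre
    subst this
    simp [hornerOct, PySem.Int.floordiv, PySem.Int.mod]
  · simp only [h, dif_neg, not_false_iff, h10, hm]
    ring
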